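-- pv_equiv track=rewrite | github.com/baballev/DailyCode | 28-02-2020-num41.py | find_itinary
-- ===== SOURCE A (Python) =====
-- def find_itinary(l, start, path):
--     # Cas de base
--     if len(path) == len(l): return [path.copy()]
--     r = start
--     itinaries = []
--     for k, (x, y) in enumerate(l):
--         if x == r and (x, y) not in path:
--             path.append((x,y))
--             itinaries += find_itinary(l, y, path)
--             path.pop()
--
--     return itinaries
-- ===== SOURCE B (Python) =====
-- def find_itinary(l, start, path):
--     # Level-synchronous search: a frontier of (node, path) states, extended one
--     # edge per round until paths reach length len(l) (or the frontier dies out).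
--     frontier = [(start, list(path))]
--     while frontier and len(frontier[0][1]) != len(l):
--         new = []
--         for r, p in frontier:
--             for e in l:
--                 if e[0] == r and e not in p:
--                     new.append((e[1], p + [e]))
--         frontier = new
--     return [p for _, p in frontier]
-- ===== Notes on version B (the rewrite author's own statement) =====
-- stated objective: alternative
-- what changed: B replaces A's recursive backtracking DFS (mutating one shared path) by an iterative level-synchronous search: a frontier list of (node, path) states is extended by one edge per round until paths reach length len(l), then the paths are read off.
import Mathlib
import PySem

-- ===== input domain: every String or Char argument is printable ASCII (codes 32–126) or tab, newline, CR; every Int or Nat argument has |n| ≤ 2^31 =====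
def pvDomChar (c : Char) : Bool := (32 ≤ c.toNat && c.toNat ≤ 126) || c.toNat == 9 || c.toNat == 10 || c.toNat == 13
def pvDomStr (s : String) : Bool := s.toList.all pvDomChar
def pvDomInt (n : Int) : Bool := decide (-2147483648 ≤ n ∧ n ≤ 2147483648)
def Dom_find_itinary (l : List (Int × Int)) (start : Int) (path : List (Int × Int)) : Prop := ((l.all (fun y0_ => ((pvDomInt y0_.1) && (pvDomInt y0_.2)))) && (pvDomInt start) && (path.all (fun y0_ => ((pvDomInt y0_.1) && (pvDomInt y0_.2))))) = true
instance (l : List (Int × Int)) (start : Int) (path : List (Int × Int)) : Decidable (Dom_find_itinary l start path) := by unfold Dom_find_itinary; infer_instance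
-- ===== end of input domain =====

-- B replaces A's recursive backtracking DFS by an iterative level-synchronous frontier search;
-- the return values are proved equal. (A mutates `path` in place but always restores it; the
-- equivalence proved here is about the return value.)

-- ===== PORT A =====
-- Fuel (l.length + 1) only makes A's recursion structural: each recursive call appends one edge
-- of l not yet in path, so at most l.length + 1 levels are ever reached and the fuel never runs out.
def find_itinary_go (n : Nat) (l : List (Int × Int)) (start : Int) (path : List (Int × Int)) :
    List (List (Int × Int)) :=
  match n with
  | 0 => []
  | n + 1 =>
    if path.length = l.length then [path]
    else
      l.foldl (fun acc e =>
        if e.1 == start && !path.contains e then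
          acc ++ find_itinary_go n l e.2 (path ++ [e])
        else acc) []

def find_itinary (l : List (Int × Int)) (start : Int) (path : List (Int × Int)) :
    List (List (Int × Int)) :=
  find_itinary_go (l.length + 1) l start path

-- ===== PORT B =====
-- one round of the while-loop body: extend every frontier state by every eligible edge
def pvExtend (l : List (Int × Int)) (frontier : List (Int × List (Int × Int))) :
    List (Int × List (Int × Int)) :=
  frontier.foldl (fun new f =>
    l.foldl (fun new2 e =>
      if e.1 == f.1 && !f.2.contains e then new2 ++ [(e.2, f.2 ++ [e])] else new2) new) []

-- the while-loop; fuel (l.length + 1) bounds the number of rounds (each round every surviving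
-- path gains a fresh distinct edge of l, so after l.length + 1 rounds the frontier is empty)
def pvLoop (n : Nat) (l : List (Int × Int)) (frontier : List (Int × List (Int × Int))) :
    List (Int × List (Int × Int)) :=
  match n with
  | 0 => frontier
  | n + 1 =>
    match frontier with
    | [] => frontier
    | f :: _ =>
      if f.2.length = l.length then frontier
      else pvLoop n l (pvExtend l frontier)

def find_itinary_alt (l : List (Int × Int)) (start : Int) (path : List (Int × Int)) :
    List (List (Int × Int)) :=
  (pvLoop (l.length + 1) l [(start, path)]).map Prod.snd

-- ===== PRECONDITION & SPEC =====
def Spec_find_itinary (l : List (Int × Int)) (start : Int) (path : List (Int × Int)) (out : List (List (Int × Int))) : Prop := out = find_itinary_alt l start path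
instance (l : List (Int × Int)) (start : Int) (path : List (Int × Int)) (out : List (List (Int × Int))) : Decidable (Spec_find_itinary l start path out) := by unfold Spec_find_itinary; infer_instance

-- ===== CLAIM (what is proved, stated in full; the proofs are below) =====
def Claim_equal_find_itinary : Prop := ∀ (l : List (Int × Int)) (start : Int) (path : List (Int × Int)), Dom_find_itinary l start path → Spec_find_itinary l start path (find_itinary l start path)

-- ===== LEMMAS AND PROOFS =====

-- number of edges of l still eligible w.r.t. membership in p (the loop variant)
def pvRem (l p : List (Int × Int)) : Nat := (l.filter (fun e => !p.contains e)).length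

theorem pvFilterLenLe {α : Type} (q r : α → Bool) (h : ∀ a, q a = true → r a = true) :
    ∀ t : List α, (t.filter q).length ≤ (t.filter r).length := by
  intro t
  induction t with
  | nil => simp
  | cons b tb ih =>
    simp only [List.filter_cons]
    by_cases hb : q b = true
    · rw [if_pos hb, if_pos (h b hb)]
      simpa using ih
    · rw [if_neg hb]
      by_cases hr : r b = true
      · rw [if_pos hr]; simp; omega
      · rw [if_neg hr]; exact ih

theorem pvFilterLenLt {α : Type} (q r : α → Bool) (h : ∀ a, q a = true → r a = true) :
    ∀ (t : List α) (e : α), e ∈ t → r e = true → q e = false →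
      (t.filter q).length < (t.filter r).length := by
  intro t
  induction t with
  | nil => intro e he; cases he
  | cons b tb ih =>
    intro e he hre hqe
    simp only [List.filter_cons]
    rcases List.mem_cons.mp he with rfl | het
    · rw [if_neg (by simp [hqe]), if_pos hre]
      simp only [List.length_cons]
      have := pvFilterLenLe q r h tb
      omega
    · have hlt := ih e het hre hqe
      by_cases hb : q b = true
      · rw [if_pos hb, if_pos (h b hb)]; simpa using hlt
      · rw [if_neg hb]
        by_cases hr : r b = true
        · rw [if_pos hr]; simp; omega
        · rw [if_neg hr]; exact hlt

theorem pvRem_lt (l p : List (Int × Int)) (e : Int × Int)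
    (he : e ∈ l) (hp : p.contains e = false) : pvRem l (p ++ [e]) < pvRem l p := by
  unfold pvRem
  apply pvFilterLenLt _ _ _ l e he
  · simpa using hp
  · simp
  · intro a ha
    simp only [List.contains_append, Bool.not_eq_eq_eq_not, Bool.not_true,
      Bool.or_eq_false_iff] at ha
    simpa using ha.1

-- B's one-round extension as a flatMap of maps
theorem pvExtend_eq (l : List (Int × Int)) (fr : List (Int × List (Int × Int))) :
    pvExtend l fr = fr.flatMap (fun f =>
      (l.filter (fun e => e.1 == f.1 && !f.2.contains e)).map (fun e => (e.2, f.2 ++ [e]))) := by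
  unfold pvExtend
  have h : ∀ (fr : List (Int × List (Int × Int))) (acc : List (Int × List (Int × Int))),
      fr.foldl (fun new f =>
        l.foldl (fun new2 e =>
          if e.1 == f.1 && !f.2.contains e then new2 ++ [(e.2, f.2 ++ [e])] else new2) new) acc
      = acc ++ fr.flatMap (fun f =>
          (l.filter (fun e => e.1 == f.1 && !f.2.contains e)).map (fun e => (e.2, f.2 ++ [e]))) := by
    intro fr
    induction fr with
    | nil => intro acc; simp
    | cons f rest ih =>
      intro acc
      simp only [List.foldl_cons, List.flatMap_cons]
      rw [PySem.List.foldl_append_if, ih, List.append_assoc]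
  rw [h, List.nil_append]

-- A's recursive case as a flatMap over the eligible edges
theorem pvGo_succ (n : Nat) (l : List (Int × Int)) (r : Int) (p : List (Int × Int))
    (h : ¬ p.length = l.length) :
    find_itinary_go (n + 1) l r p
      = (l.filter (fun e => e.1 == r && !p.contains e)).flatMap
          (fun e => find_itinary_go n l e.2 (p ++ [e])) := by
  simp only [find_itinary_go, if_neg h]
  rw [PySem.List.foldl_if_eq_foldl_filter, PySem.List.foldl_append_eq_flatMap, List.nil_append]

-- main invariant: on a frontier of equal-length states whose variant is below the fuel,
-- the loop's paths are the concatenation of each state's DFS results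
theorem pvLoop_eq (l : List (Int × Int)) :
    ∀ (n : Nat) (c : Nat) (fr : List (Int × List (Int × Int))),
    (∀ f ∈ fr, f.2.length = c) →
    (∀ f ∈ fr, pvRem l f.2 < n) →
    (pvLoop n l fr).map Prod.snd = fr.flatMap (fun f => find_itinary_go n l f.1 f.2) := by
  intro n
  induction n with
  | zero =>
    intro c fr _ hv
    cases fr with
    | nil => rfl
    | cons f rest => exact absurd (hv f (by simp)) (by omega)
  | succ n ih =>
    intro c fr hc hv
    cases fr with
    | nil => rfl
    | cons f rest =>
      by_cases hcl : c = l.length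
      · -- every state is complete: loop stops, each DFS call returns its own path
        have hf : f.2.length = l.length := by rw [hc f (by simp)]; exact hcl
        simp only [pvLoop, if_pos hf]
        have : ∀ g ∈ f :: rest, find_itinary_go (n + 1) l g.1 g.2 = [g.2] := by
          intro g hg
          have : g.2.length = l.length := by rw [hc g hg]; exact hcl
          simp [find_itinary_go, this]
        rw [List.flatMap_congr this]
        simp [List.map_eq_flatMap]
      · -- extend one level and use the induction hypothesis
        have hf : ¬ f.2.length = l.length := by rw [hc f (by simp)]; exact hcl
        simp only [pvLoop, if_neg hf]
        have hstep : ∀ f' ∈ pvExtend l (f :: rest),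
            f'.2.length = c + 1 ∧ pvRem l f'.2 < n := by
          intro f' hf'
          rw [pvExtend_eq] at hf'
          simp only [List.mem_flatMap, List.mem_map, List.mem_filter] at hf'
          obtain ⟨g, hg, e, ⟨hel, hguard⟩, rfl⟩ := hf'
          have hpc : g.2.contains e = false := by
            simp only [Bool.and_eq_true] at hguard
            simpa using hguard.2
          constructor
          · simp [hc g hg]
          · show pvRem l (g.2 ++ [e]) < n
            have := pvRem_lt l g.2 e hel hpc
            have := hv g hg
            omega
        rw [ih (c + 1) (pvExtend l (f :: rest))
              (fun f' h => (hstep f' h).1) (fun f' h => (hstep f' h).2)]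
        rw [pvExtend_eq, List.flatMap_assoc]
        apply List.flatMap_congr
        intro g hg
        have hgl : ¬ g.2.length = l.length := by rw [hc g hg]; exact hcl
        rw [pvGo_succ n l g.1 g.2 hgl, List.flatMap_map]

-- ===== VERDICT (by name: the statement is the Claim_ definition above) =====
theorem find_itinary_spec : Claim_equal_find_itinary := by
  intro l start path _
  unfold Spec_find_itinary find_itinary find_itinary_alt
  rw [pvLoop_eq l (l.length + 1) path.length [(start, path)]
        (by intro f hf; simp at hf; simp [hf])
        (by intro f hf; simp at hf; subst hf
            show pvRem l path < l.length + 1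
            have : pvRem l path ≤ l.length := List.length_filter_le _ _
            omega)]
  simp
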